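-- pv_equiv track=rewrite | github.com/miriamgrigsby/advent_of_code | 2020/day_9/day9.py | solve_day9_part1
-- ===== SOURCE A (Python) =====
-- from typing import List
--
-- def solve_day9_part1(input: List[int], preamble: int) -> int:
--     for index, number in enumerate(input[preamble:]):
--         number_matches = False
--         preamble_array = input[index:preamble+index]
--         for preamble_number in preamble_array:
--             for inner_preamble_number in preamble_array:
--                 if preamble_number == inner_preamble_number:
--                     continue
--                 if preamble_number + inner_preamble_number == number:
--                     number_matches = True
--         if not number_matches:
--             return number
--     return 0
-- ===== SOURCE B (Python) =====
-- from typing import List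
--
-- def solve_day9_part1(input: List[int], preamble: int) -> int:
--     # Sliding-window counter: one dict maintained incrementally (lazy deletion:
--     # counts may keep zero entries), instead of rescanning each window.
--     counts = {}
--     for v in input[:preamble]:
--         counts[v] = counts.get(v, 0) + 1
--     for number, old in zip(input[preamble:], input):
--         if not any(counts[x] > 0 and counts.get(number - x, 0) > 0 and number - x != x
--                    for x in counts):
--             return number
--         counts[number] = counts.get(number, 0) + 1
--         counts[old] -= 1
--     return 0
-- ===== Notes on version B (the rewrite author's own statement) =====
-- stated objective: faster
-- what changed: Replaces A's per-position re-sliced window with an O(p^2) double scan by a single sliding-window counter dict updated incrementally (add the entering number, decrement the leaving one) with an O(p) complement-membership check per position.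
import Mathlib
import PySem

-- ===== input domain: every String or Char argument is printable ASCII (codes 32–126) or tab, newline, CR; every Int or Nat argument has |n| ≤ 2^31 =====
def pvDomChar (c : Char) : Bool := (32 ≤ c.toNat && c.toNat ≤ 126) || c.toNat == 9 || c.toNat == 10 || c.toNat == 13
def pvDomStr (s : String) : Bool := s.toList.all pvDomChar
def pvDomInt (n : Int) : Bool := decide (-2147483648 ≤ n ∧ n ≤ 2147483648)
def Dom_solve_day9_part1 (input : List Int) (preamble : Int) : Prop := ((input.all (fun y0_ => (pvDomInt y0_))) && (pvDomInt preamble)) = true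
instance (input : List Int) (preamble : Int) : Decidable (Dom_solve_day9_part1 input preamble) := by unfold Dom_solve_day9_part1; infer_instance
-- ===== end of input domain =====

-- B maintains ONE sliding-window counter dict updated incrementally per step, instead of A's
-- re-sliced window with an O(p^2) double scan per position: asymptotically faster.

-- ===== PORT A =====
-- inner double loop over preamble_array setting number_matches
def pvAInner (arr : List Int) (number : Int) : Bool :=
  arr.foldl (fun m a =>
    arr.foldl (fun m b =>
      if a == b then m
      else if a + b == number then true
      else m) m) false

-- 'for index, number in enumerate(input[preamble:])' with early return
def pvALoop (input : List Int) (preamble : Int) : List (Int × Int) → Int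
  | [] => 0
  | (index, number) :: rest =>
    let preamble_array := PySem.List.slice input (some index) (some (preamble + index))
    if pvAInner preamble_array number then pvALoop input preamble rest
    else number

def solve_day9_part1 (input : List Int) (preamble : Int) : Int :=
  pvALoop input preamble (PySem.List.enumerate (PySem.List.slice input (some preamble) none) 0)

-- ===== PORT B =====
-- 'any(counts[x] > 0 and counts.get(number - x, 0) > 0 and number - x != x for x in counts)'
def pvBPair (counts : PySem.Dict Int Int) (number : Int) : Bool :=
  counts.keys.any (fun x =>
    decide (0 < counts.getD x 0) && decide (0 < counts.getD (number - x) 0) && (number - x != x))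

-- 'for number, old in zip(input[preamble:], input)': add the new number, lazily decrement the
-- element that leaves the window ('counts[old] -= 1'; zero entries stay in the dict)
def pvBLoop (counts : PySem.Dict Int Int) : List (Int × Int) → Int
  | [] => 0
  | (number, old) :: rest =>
    if pvBPair counts number then
      let c1 := counts.insert number (counts.getD number 0 + 1)
      pvBLoop (c1.insert old (c1.getD old 0 - 1)) rest
    else number

def solve_day9_part1_alt (input : List Int) (preamble : Int) : Int :=
  let counts := (PySem.List.slice input none (some preamble)).foldl
      (fun c v => c.insert v (c.getD v 0 + 1)) PySem.Dict.empty
  pvBLoop counts ((PySem.List.slice input (some preamble) none).zip input)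

-- ===== PRECONDITION & SPEC =====
def Spec_solve_day9_part1 (input : List Int) (preamble : Int) (out : Int) : Prop := out = solve_day9_part1_alt input preamble
instance (input : List Int) (preamble : Int) (out : Int) : Decidable (Spec_solve_day9_part1 input preamble out) := by unfold Spec_solve_day9_part1; infer_instance

-- ===== CLAIM (what is proved, stated in full; the proofs are below) =====
def Claim_equal_solve_day9_part1 : Prop := ∀ (input : List Int) (preamble : Int), Dom_solve_day9_part1 input preamble → Spec_solve_day9_part1 input preamble (solve_day9_part1 input preamble)

-- ===== LEMMAS AND PROOFS =====

-- counts represents the current window w: every stored count is w's multiplicity,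
-- and every window element is among the keys (zero-count keys may linger).
def pvRep (c : PySem.Dict Int Int) (w : List Int) : Prop :=
  (∀ v : Int, c.getD v 0 = (w.count v : Int)) ∧ (∀ v : Int, v ∈ w → v ∈ c.keys)

-- A's flag-setting loops are disjunctions
theorem pv_foldl_or (p : Int → Bool) (l : List Int) (m : Bool) :
    l.foldl (fun m x => m || p x) m = (m || l.any p) := by
  induction l generalizing m with
  | nil => simp
  | cons x xs ih => simp [List.foldl_cons, ih, Bool.or_assoc]

theorem pv_inner_loop_eq (a number : Int) (arr : List Int) (m : Bool) :
    arr.foldl (fun m b => if a == b then m else if a + b == number then true else m) m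
      = (m || arr.any (fun b => !(a == b) && (a + b == number))) := by
  induction arr generalizing m with
  | nil => simp
  | cons x xs ih =>
    simp only [List.foldl_cons, List.any_cons]
    rw [ih]
    by_cases h1 : a = x
    · simp [h1]
    · by_cases h2 : a + x = number
      · simp [h1, h2]
      · have hb : (a + x == number) = false := by simp [h2]
        simp [h1, hb]

theorem pvAInner_iff (arr : List Int) (number : Int) :
    pvAInner arr number = true ↔ ∃ a ∈ arr, ∃ b ∈ arr, a ≠ b ∧ a + b = number := by
  unfold pvAInner
  rw [show (fun (m : Bool) (a : Int) =>
        List.foldl (fun m b => if a == b then m else if a + b == number then true else m) m arr)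
      = (fun m a => m || arr.any (fun b => !(a == b) && (a + b == number)))
      from funext fun m => funext fun a => pv_inner_loop_eq a number arr m]
  rw [pv_foldl_or]
  simp [List.any_eq_true]

theorem pvBPair_iff (c : PySem.Dict Int Int) (number : Int) :
    pvBPair c number = true ↔
      ∃ x ∈ c.keys, 0 < c.getD x 0 ∧ 0 < c.getD (number - x) 0 ∧ number - x ≠ x := by
  unfold pvBPair
  simp [List.any_eq_true, bne_iff_ne, and_assoc]

-- under pvRep the two membership tests agree
theorem pv_check_eq (c : PySem.Dict Int Int) (w : List Int) (number : Int) (h : pvRep c w) :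
    pvBPair c number = pvAInner w number := by
  obtain ⟨h1, h2⟩ := h
  rw [Bool.eq_iff_iff, pvBPair_iff, pvAInner_iff]
  constructor
  · rintro ⟨x, _, hx, hnx, hne⟩
    rw [h1] at hx hnx
    refine ⟨x, ?_, number - x, ?_, by omega, by omega⟩
    · exact List.count_pos_iff.mp (by exact_mod_cast hx)
    · exact List.count_pos_iff.mp (by exact_mod_cast hnx)
  · rintro ⟨a, ha, b, hb, hab, hsum⟩
    refine ⟨a, h2 a ha, ?_, ?_, by omega⟩
    · rw [h1]; exact_mod_cast List.count_pos_iff.mpr ha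
    · rw [h1]
      have : number - a = b := by omega
      rw [this]
      exact_mod_cast List.count_pos_iff.mpr hb

-- counter xs represents xs
theorem pvRep_counter (xs : List Int) : pvRep (PySem.Dict.counter xs) xs := by
  constructor
  · intro v; exact PySem.Dict.getD_counter xs v
  · intro v hv
    rw [PySem.Dict.keys_counter]
    exact (PySem.Set.mem_ofList xs v).2 hv

-- one incremental update: add num, decrement the departing head
theorem pvRep_step (c : PySem.Dict Int Int) (old num : Int) (t : List Int)
    (h : pvRep c (old :: t)) :
    pvRep ((c.insert num (c.getD num 0 + 1)).insert old
           ((c.insert num (c.getD num 0 + 1)).getD old 0 - 1)) (t ++ [num]) := by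
  obtain ⟨h1, h2⟩ := h
  constructor
  · intro v
    have hc : ∀ u : Int, (List.count u (old :: t) : Int)
        = (if u = old then 1 else 0) + (List.count u t : Int) := by
      intro u
      rw [List.count_cons]; push_cast
      rcases eq_or_ne old u with hu | hu
      · simp [hu]; omega
      · simp [hu, Ne.symm hu]
    have hc2 : (List.count v (t ++ [num]) : Int)
        = (List.count v t : Int) + (if v = num then 1 else 0) := by
      rw [List.count_append, List.count_singleton]; push_cast
      rcases eq_or_ne num v with hu | hu
      · simp [hu]
      · simp [hu, Ne.symm hu]
    simp only [PySem.Dict.getD_insert, h1, hc, hc2]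
    by_cases ho : v = old <;> by_cases hn : v = num <;> subst_vars <;>
      split_ifs <;> (try simp_all) <;> omega
  · intro v hv
    rw [PySem.Dict.mem_keys_insert, PySem.Dict.mem_keys_insert]
    rcases List.mem_append.1 hv with hv | hv
    · exact Or.inr (Or.inr (h2 v (List.mem_cons_of_mem _ hv)))
    · exact Or.inr (Or.inl (List.mem_singleton.1 hv))

-- the window slides: if the current window is nonempty and another step follows, the
-- next slice drops the head (= input[k]) and appends input[preamble:][k]
theorem pvSlide (input : List Int) (p : Int) (k : Nat)
    (hk1 : k + 1 < (PySem.List.slice input (some p) none).length)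
    (hne : PySem.List.slice input (some (k : Int)) (some (p + (k : Int))) ≠ []) :
    ∃ hd t num, input[k]? = some hd ∧ (PySem.List.slice input (some p) none)[k]? = some num ∧
      PySem.List.slice input (some (k : Int)) (some (p + (k : Int))) = hd :: t ∧
      PySem.List.slice input (some ((k : Int) + 1)) (some (p + ((k : Int) + 1))) = t ++ [num] := by
  have hnum : PySem.List.slice input (some p) none
      = input.drop (PySem.List.clampIdx input.length p) := PySem.List.slice_some_none input p
  have hsl : ∀ a b : Int, PySem.List.slice input (some a) (some b)
      = List.take (PySem.List.clampIdx input.length b - PySem.List.clampIdx input.length a)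
          (List.drop (PySem.List.clampIdx input.length a) input) := fun a b => rfl
  have hk1' : k + 1 < input.length - PySem.List.clampIdx input.length p := by
    rw [hnum] at hk1; simpa using hk1
  rw [hsl] at hne
  have h1 : PySem.List.clampIdx input.length ((k : Int)) < PySem.List.clampIdx input.length (p + (k : Int))
      ∧ PySem.List.clampIdx input.length ((k : Int)) < input.length := by
    by_contra hcon
    apply hne
    rcases Nat.lt_or_ge (PySem.List.clampIdx input.length ((k : Int)))
        (PySem.List.clampIdx input.length (p + (k : Int))) with h | h
    · rcases Nat.lt_or_ge (PySem.List.clampIdx input.length ((k : Int))) input.length with h2 | h2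
      · exact absurd ⟨h, h2⟩ hcon
      · rw [List.drop_eq_nil_of_le h2, List.take_nil]
    · rw [Nat.sub_eq_zero_of_le h, List.take_zero]
  have hck : PySem.List.clampIdx input.length ((k : Int)) = k := by
    have h := h1.2
    simp only [PySem.List.clampIdx] at h ⊢
    split_ifs at h ⊢ <;> omega
  have hkn : k < input.length := by rw [hck] at h1; exact h1.2
  have hq1 : PySem.List.clampIdx input.length (p + (k : Int))
      = PySem.List.clampIdx input.length p + k := by
    have h := h1.1
    rw [hck] at h
    simp only [PySem.List.clampIdx] at h hk1' ⊢
    split_ifs at h hk1' ⊢ <;> omega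
  have hq2 : PySem.List.clampIdx input.length (p + ((k : Int) + 1))
      = PySem.List.clampIdx input.length p + k + 1 := by
    have h := h1.1
    rw [hck, hq1] at h
    simp only [PySem.List.clampIdx] at h hk1' ⊢
    split_ifs at h hk1' ⊢ <;> omega
  have hck1 : PySem.List.clampIdx input.length ((k : Int) + 1) = k + 1 := by
    simp only [PySem.List.clampIdx]
    split_ifs <;> omega
  have hP : 0 < PySem.List.clampIdx input.length p := by
    have h := h1.1; rw [hck, hq1] at h; omega
  have hPk : PySem.List.clampIdx input.length p + k + 1 < input.length := by omega
  refine ⟨input[k], (input.drop (k+1)).take (PySem.List.clampIdx input.length p - 1),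
      input[PySem.List.clampIdx input.length p + k], List.getElem?_eq_getElem hkn, ?_, ?_, ?_⟩
  · rw [hnum, List.getElem?_drop]
    exact List.getElem?_eq_getElem (by omega)
  · rw [hsl, hck, hq1, Nat.add_sub_cancel, List.drop_eq_getElem_cons hkn]
    rw [show PySem.List.clampIdx input.length p
        = (PySem.List.clampIdx input.length p - 1) + 1 from by omega, List.take_succ_cons]
    simp
  · rw [hsl, hck1, hq2]
    rw [show PySem.List.clampIdx input.length p + k + 1 - (k + 1)
        = (PySem.List.clampIdx input.length p - 1) + 1 from by omega]
    rw [List.take_add_one, List.getElem?_drop]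
    rw [show k + 1 + (PySem.List.clampIdx input.length p - 1)
        = PySem.List.clampIdx input.length p + k from by omega]
    rw [List.getElem?_eq_getElem (show PySem.List.clampIdx input.length p + k < input.length from by omega)]
    rfl

theorem pvMain (input : List Int) (p : Int) :
    ∀ (n k : Nat) (c : PySem.Dict Int Int),
      (PySem.List.slice input (some p) none).length - k ≤ n →
      (k < (PySem.List.slice input (some p) none).length →
        pvRep c (PySem.List.slice input (some (k : Int)) (some (p + (k : Int))))) →
      pvALoop input p (PySem.List.enumerate ((PySem.List.slice input (some p) none).drop k) (k : Int)) =
      pvBLoop c (((PySem.List.slice input (some p) none).drop k).zip (input.drop k)) := by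
  intro n
  induction n with
  | zero =>
    intro k c hfuel _
    have hk : (PySem.List.slice input (some p) none).length ≤ k := by omega
    rw [List.drop_eq_nil_of_le hk]
    simp [pvALoop, pvBLoop]
  | succ n ih =>
    intro k c hfuel hrep
    by_cases hk : k < (PySem.List.slice input (some p) none).length
    · have hkn : k < input.length := by
        rw [PySem.List.slice_some_none input p] at hk
        simp at hk; omega
      have hnums := List.drop_eq_getElem_cons hk
      have hinp := List.drop_eq_getElem_cons hkn
      rw [hnums, hinp, PySem.List.enumerate_cons, List.zip_cons_cons]
      rw [pvALoop, pvBLoop]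
      rw [pv_check_eq c _ _ (hrep hk)]
      cases hAB : pvAInner (PySem.List.slice input (some (k : Int)) (some (p + (k : Int))))
          (PySem.List.slice input (some p) none)[k] with
      | false => simp
      | true =>
        simp only [if_true]
        by_cases hk1 : k + 1 < (PySem.List.slice input (some p) none).length
        · have hne : PySem.List.slice input (some (k : Int)) (some (p + (k : Int))) ≠ [] := by
            intro hemp
            rw [hemp] at hAB
            simp [pvAInner] at hAB
          obtain ⟨hd, t, num, hhd, hnum, hw, hw1⟩ := pvSlide input p k hk1 hne
          rw [List.getElem?_eq_getElem hkn] at hhd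
          rw [List.getElem?_eq_getElem hk] at hnum
          obtain rfl : input[k] = hd := Option.some_inj.mp hhd
          obtain rfl : (PySem.List.slice input (some p) none)[k] = num := Option.some_inj.mp hnum
          have hrep' : pvRep c (input[k] :: t) := by
            rw [← hw]
            exact hrep hk
          have hstep := pvRep_step c input[k] (PySem.List.slice input (some p) none)[k] t hrep'
          have hcast : ((k + 1 : Nat) : Int) = (k : Int) + 1 := by push_cast; ring
          have happ := ih (k + 1) ((c.insert (PySem.List.slice input (some p) none)[k]
              (c.getD (PySem.List.slice input (some p) none)[k] 0 + 1)).insert input[k]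
              ((c.insert (PySem.List.slice input (some p) none)[k]
                (c.getD (PySem.List.slice input (some p) none)[k] 0 + 1)).getD input[k] 0 - 1))
            (by omega)
            (by
              intro _
              rw [hcast, hw1]
              exact hstep)
          rw [hcast] at happ
          exact happ
        · -- last step: both remaining lists are empty
          have hk1' : (PySem.List.slice input (some p) none).length ≤ k + 1 := by omega
          rw [List.drop_eq_nil_of_le hk1']
          simp [pvALoop, pvBLoop]
    · have hk' : (PySem.List.slice input (some p) none).length ≤ k := by omega
      rw [List.drop_eq_nil_of_le hk']
      simp [pvALoop, pvBLoop]

-- ===== VERDICT (by name: the statement is the Claim_ definition above) =====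
theorem solve_day9_part1_spec : Claim_equal_solve_day9_part1 := by
  intro input preamble _
  unfold Spec_solve_day9_part1 solve_day9_part1 solve_day9_part1_alt
  rw [PySem.Dict.foldl_insert_getD_add_one_eq_counter]
  have h := pvMain input preamble ((PySem.List.slice input (some preamble) none).length) 0
    (PySem.Dict.counter (PySem.List.slice input none (some preamble)))
    (by omega)
    (by
      intro _
      have : PySem.List.slice input (some ((0 : Nat) : Int)) (some (preamble + ((0 : Nat) : Int)))
          = PySem.List.slice input none (some preamble) := by
        norm_num
      rw [this]
      exact pvRep_counter _)
  simpa using h
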